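-- pv_equiv track=rewrite | github.com/mikegashler/vidscript | vidscript/dom.py | count_leading_spaces
-- ===== SOURCE A (Python) =====
-- def count_leading_spaces(s:str, line_num:int) -> int:
--     space_count = 0
--     for i in range(len(s)):
--         if s[i] > ' ':
--             return space_count
--         elif s[i] == ' ':
--             space_count += 1
--         elif s[i] == '\t':
--             space_count += 4
--         else:
--             raise ValueError(f'Error on line {line_num}: Only spaces and tabs are allowed as leading characters. Got ascii char {ord(s[i])}.')
--     raise ValueError(f'Error on line {line_num}: Internal error. Only whitespace lines should not reach here.')
-- ===== SOURCE B (Python) =====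
-- def count_leading_spaces(s: str, line_num: int) -> int:
--     stripped = s.lstrip(' \t')
--     lead = s[:len(s) - len(stripped)]
--     if stripped == '':
--         raise ValueError(f'Error on line {line_num}: Internal error. Only whitespace lines should not reach here.')
--     if stripped[0] <= ' ':
--         raise ValueError(f'Error on line {line_num}: Only spaces and tabs are allowed as leading characters. Got ascii char {ord(stripped[0])}.')
--     return lead.count(' ') + 4 * lead.count('\t')
-- ===== Notes on version B (the rewrite author's own statement) =====
-- stated objective: idiomatic
-- what changed: Replaces the index loop with running accumulator by lstrip to split off the leading run once, then two count() calls over the prefix (spaces + 4*tabs); raises the same errors from the first stripped character.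
import Mathlib
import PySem

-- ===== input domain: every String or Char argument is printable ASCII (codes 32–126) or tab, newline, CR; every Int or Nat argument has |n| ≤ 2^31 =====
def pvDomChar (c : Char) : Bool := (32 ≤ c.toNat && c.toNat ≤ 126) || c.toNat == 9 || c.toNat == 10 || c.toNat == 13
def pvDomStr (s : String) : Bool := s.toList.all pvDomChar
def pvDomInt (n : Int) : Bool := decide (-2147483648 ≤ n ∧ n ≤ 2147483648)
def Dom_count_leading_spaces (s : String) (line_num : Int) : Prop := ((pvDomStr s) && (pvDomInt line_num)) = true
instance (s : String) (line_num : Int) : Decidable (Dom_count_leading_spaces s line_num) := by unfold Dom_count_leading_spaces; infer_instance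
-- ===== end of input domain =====

-- B splits the leading space/tab run off once with lstrip and counts it with two count() calls,
-- instead of A's index loop with a running accumulator; same ValueErrors (excluded by Pre_).

-- ===== PORT A =====
-- A's loop over indices, as structural recursion on the character list with the
-- space_count accumulator; the two 'raise' branches are outside Pre_ and return 0 here.
def pvLoopA : List Char → Int → Int
  | [], _ => 0                    -- raise ValueError (internal error): outside Pre_
  | c :: rest, acc =>
    if c > ' ' then acc
    else if c = ' ' then pvLoopA rest (acc + 1)
    else if c = '\t' then pvLoopA rest (acc + 4)
    else 0                        -- raise ValueError (bad leading char): outside Pre_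

def count_leading_spaces (s : String) (line_num : Int) : Int :=
  pvLoopA s.toList 0

-- ===== PORT B =====
def count_leading_spaces_alt (s : String) (line_num : Int) : Int :=
  let cs := s.toList
  let stripped := cs.dropWhile (fun c => c == ' ' || c == '\t')   -- s.lstrip(' \t')
  let lead := cs.take (cs.length - stripped.length)               -- s[:len(s)-len(stripped)]
  match stripped with
  | [] => 0                       -- raise ValueError (internal error): outside Pre_
  | c :: _ =>
    if c ≤ ' ' then 0             -- raise ValueError (bad leading char): outside Pre_
    else (lead.count ' ' : Int) + 4 * (lead.count '\t' : Int)

-- ===== PRECONDITION & SPEC =====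
-- Pre_ excludes exactly the inputs on which A raises ValueError: strings whose leading
-- run of spaces/tabs is followed by nothing (empty or all-whitespace line) or by a
-- control character ≤ ' ' other than space/tab.
def Pre_count_leading_spaces (s : String) (line_num : Int) : Prop :=
  (s.toList.dropWhile (fun c => c == ' ' || c == '\t')).headD ' ' > ' '
instance (s : String) (line_num : Int) : Decidable (Pre_count_leading_spaces s line_num) := by unfold Pre_count_leading_spaces; infer_instance

def pvWitness_count_leading_spaces : String × Int := ("  \tx", 3)

def Spec_count_leading_spaces (s : String) (line_num : Int) (out : Int) : Prop := out = count_leading_spaces_alt s line_num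
instance (s : String) (line_num : Int) (out : Int) : Decidable (Spec_count_leading_spaces s line_num out) := by unfold Spec_count_leading_spaces; infer_instance

-- ===== CLAIM (what is proved, stated in full; the proofs are below) =====
def Claim_equal_count_leading_spaces : Prop := ∀ (s : String) (line_num : Int), Dom_count_leading_spaces s line_num → Pre_count_leading_spaces s line_num → Spec_count_leading_spaces s line_num (count_leading_spaces s line_num)

-- ===== LEMMAS AND PROOFS =====

-- The core invariant: on any char list whose stripped head exceeds ' ' (headD with
-- default ' ' makes the empty case false), A's loop from accumulator acc returns
-- acc + spaces-in-lead + 4 * tabs-in-lead, where lead is what lstrip removed.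
theorem pvLoopA_eq (cs : List Char) :
    ∀ acc : Int,
      (cs.dropWhile (fun c => c == ' ' || c == '\t')).headD ' ' > ' ' →
      pvLoopA cs acc =
        acc + ((cs.take (cs.length - (cs.dropWhile (fun c => c == ' ' || c == '\t')).length)).count ' ' : Int)
            + 4 * ((cs.take (cs.length - (cs.dropWhile (fun c => c == ' ' || c == '\t')).length)).count '\t' : Int) := by
  induction cs with
  | nil => intro acc h; exact absurd h (by decide)
  | cons c rest ih =>
    intro acc h
    by_cases hsp : c = ' '
    · subst hsp
      rw [List.dropWhile_cons_of_pos (by decide)] at h ⊢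
      have hlen : (rest.dropWhile (fun c => c == ' ' || c == '\t')).length ≤ rest.length :=
        List.length_dropWhile_le _ _
      have hsub : (' ' :: rest).length - (rest.dropWhile (fun c => c == ' ' || c == '\t')).length
           = (rest.length - (rest.dropWhile (fun c => c == ' ' || c == '\t')).length) + 1 := by
        simp only [List.length_cons]; omega
      rw [hsub]
      simp only [pvLoopA, List.take_succ_cons, List.count_cons]
      rw [if_neg (by decide : ¬ (' ' > ' '))]
      simp only [beq_self_eq_true, if_true, (by decide : ((' ' : Char) == '\t') = false),
        Bool.false_eq_true, if_false]
      rw [ih (acc + 1) h]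
      push_cast
      ring
    · by_cases htb : c = '\t'
      · subst htb
        rw [List.dropWhile_cons_of_pos (by decide)] at h ⊢
        have hlen : (rest.dropWhile (fun c => c == ' ' || c == '\t')).length ≤ rest.length :=
          List.length_dropWhile_le _ _
        have hsub : ('\t' :: rest).length - (rest.dropWhile (fun c => c == ' ' || c == '\t')).length
             = (rest.length - (rest.dropWhile (fun c => c == ' ' || c == '\t')).length) + 1 := by
          simp only [List.length_cons]; omega
        rw [hsub]
        simp only [pvLoopA, List.take_succ_cons, List.count_cons]
        rw [if_neg (by decide : ¬ ('\t' > ' '))]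
        simp only [beq_self_eq_true, if_true, (by decide : (('\t' : Char) == ' ') = false),
          Bool.false_eq_true, if_false]
        rw [ih (acc + 4) h]
        push_cast
        ring
      · -- c is neither space nor tab: dropWhile stops here, so h says c > ' '
        have hd : ((c == ' ') || (c == '\t')) = false := by simp [hsp, htb]
        rw [List.dropWhile_cons_of_neg (by simp [hd])] at h ⊢
        simp only [List.headD_cons] at h
        simp [pvLoopA, h, hsp]

-- ===== VERDICT (by name: the statement is the Claim_ definition above) =====
theorem count_leading_spaces_spec : Claim_equal_count_leading_spaces := by
  intro s ln _hdom hpre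
  unfold Spec_count_leading_spaces count_leading_spaces count_leading_spaces_alt
  unfold Pre_count_leading_spaces at hpre
  rcases hstr : s.toList.dropWhile (fun c => c == ' ' || c == '\t') with _ | ⟨c, rest⟩
  · rw [hstr] at hpre; exact absurd hpre (by decide)
  · rw [hstr] at hpre
    simp only [List.headD_cons] at hpre
    simp only [hstr]
    rw [if_neg (not_le.mpr hpre)]
    have := pvLoopA_eq s.toList 0 (by rw [hstr]; simpa using hpre)
    rw [hstr] at this
    rw [this]
    ring
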